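-- pv_equiv track=rewrite | github.com/zhangyu345293721/leetcode | src/leetcodepython/string/reverse_string2_541.py | get_reverse_string3
-- ===== SOURCE A (Python) =====
-- def get_reverse_string3(s: str, k: int) -> str:
--     '''
--         字符串反转
--     Args:
--         arr: 字符串
--     Returns:
--         反转后字符串
--     '''
--     if len(s) < k:
--         return s[::-1]
--     i = 0
--     length = len(s)
--     str_list = list(s)
--     while i < length:
--         start, end = i, min(i + k - 1, length - 1)
--         while start < end:
--             temp = str_list[start]
--             str_list[start] = str_list[end]
--             str_list[end] = temp
--             start += 1
--             end -= 1
--         i += 2 * k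
--     return ''.join(str_list)
-- ===== SOURCE B (Python) =====
-- def get_reverse_string3(s: str, k: int) -> str:
--     res = []
--     i = 0
--     while i < len(s):
--         res.append(s[i:i + k][::-1] + s[i + k:i + 2 * k])
--         i += 2 * k
--     return ''.join(res)
-- ===== Notes on version B (the rewrite author's own statement) =====
-- stated objective: idiomatic
-- what changed: Replaces the in-place two-pointer character-swap over a list(s) buffer (plus an explicit short-string guard) with a single pass that slices each 2k block, reverses the first k chars by slicing, and joins the pieces; the len(s)<k guard disappears because the first block's slice already yields s[::-1]. Pre_ excludes nonempty s with k <= 0, where both A and B loop forever (i += 2*k never advances).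
import Mathlib
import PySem

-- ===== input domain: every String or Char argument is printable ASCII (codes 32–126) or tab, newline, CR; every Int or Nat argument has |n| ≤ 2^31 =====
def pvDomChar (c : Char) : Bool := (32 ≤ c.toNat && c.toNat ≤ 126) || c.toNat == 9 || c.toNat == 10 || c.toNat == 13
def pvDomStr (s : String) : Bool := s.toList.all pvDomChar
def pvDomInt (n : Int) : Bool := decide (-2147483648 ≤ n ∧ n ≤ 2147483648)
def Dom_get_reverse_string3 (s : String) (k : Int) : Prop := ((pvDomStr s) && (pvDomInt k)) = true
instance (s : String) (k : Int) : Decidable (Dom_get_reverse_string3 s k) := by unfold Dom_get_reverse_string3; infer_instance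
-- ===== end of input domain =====

-- B replaces A's in-place two-pointer swap over a list(s) buffer (and its explicit
-- short-string guard) with a slice-reverse-and-join pass over the 2k blocks; proved equal on
-- Pre_ (outside Pre_ both Pythons loop forever, so A returns nothing there).

-- ===== PORT A =====
-- inner 'while start < end' swap loop on the character buffer (indices are in range in
-- every state reached under Pre_, where pyGetD/pySetD are exact)
def pvSwapA (l : List Char) (start e : Int) : List Char :=
  if start < e then
    pvSwapA
      (PySem.List.pySetD (PySem.List.pySetD l start (PySem.List.pyGetD l e ' '))
        e (PySem.List.pyGetD l start ' '))
      (start + 1) (e - 1)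
  else l
termination_by (e - start).toNat
decreasing_by omega

-- outer 'while i < length' loop; the '0 < k' test only totalizes the port: with k ≤ 0 and
-- i < length Python's loop never terminates (such inputs are outside Pre_)
def pvOuterA (l : List Char) (k len i : Int) : List Char :=
  if i < len then
    if 0 < k then
      pvOuterA (pvSwapA l i (min (i + k - 1) (len - 1))) k len (i + 2 * k)
    else l
  else l
termination_by (len - i).toNat
decreasing_by omega

def get_reverse_string3 (s : String) (k : Int) : String :=
  if PySem.Str.len s < k then (PySem.Str.slice? s none none (-1)).getD s   -- s[::-1]
  else String.ofList (pvOuterA s.toList k (PySem.Str.len s) 0)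

-- ===== PORT B =====
-- 'while i < len(s): res.append(s[i:i+k][::-1] + s[i+k:i+2*k]); i += 2*k'; the '0 < k'
-- test only totalizes the port (with k ≤ 0 and nonempty s the Python loop never ends)
def pvLoopB (cs : List Char) (k i : Int) (res : List (List Char)) : List (List Char) :=
  if i < (cs.length : Int) then
    if 0 < k then
      pvLoopB cs k (i + 2 * k)
        (res ++ [(PySem.List.slice cs (some i) (some (i + k))).reverse ++
                 PySem.List.slice cs (some (i + k)) (some (i + 2 * k))])
    else res
  else res
termination_by ((cs.length : Int) - i).toNat
decreasing_by omega

def get_reverse_string3_alt (s : String) (k : Int) : String :=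
  String.ofList (pvLoopB s.toList k 0 []).flatten   -- ''.join(res)

-- ===== PRECONDITION & SPEC =====
-- Pre_ excludes exactly the inputs on which A returns nothing: for nonempty s with k ≤ 0
-- the outer loop's 'i += 2*k' never advances past len(s), so A (and B) loop forever.
def Pre_get_reverse_string3 (s : String) (k : Int) : Prop := 1 ≤ k ∨ s = ""
instance (s : String) (k : Int) : Decidable (Pre_get_reverse_string3 s k) := by
  unfold Pre_get_reverse_string3; infer_instance

def pvWitness_get_reverse_string3 : String × Int := ("ab", 2)

def Spec_get_reverse_string3 (s : String) (k : Int) (out : String) : Prop := out = get_reverse_string3_alt s k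
instance (s : String) (k : Int) (out : String) : Decidable (Spec_get_reverse_string3 s k out) := by
  unfold Spec_get_reverse_string3; infer_instance

-- ===== CLAIM (what is proved, stated in full; the proofs are below) =====
def Claim_equal_get_reverse_string3 : Prop := ∀ (s : String) (k : Int), Dom_get_reverse_string3 s k → Pre_get_reverse_string3 s k → Spec_get_reverse_string3 s k (get_reverse_string3 s k)

-- ===== LEMMAS AND PROOFS =====

-- common specification: per 2k block, the first k chars reversed, then the next k chars
def gsp (xs : List Char) (k : Nat) : List Char :=
  if h : xs = [] ∨ k = 0 then [] else
    (xs.take k).reverse ++ (xs.drop k).take k ++ gsp (xs.drop (2 * k)) k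
termination_by xs.length
decreasing_by
  push Not at h
  have : 0 < xs.length := List.length_pos_iff.mpr h.1
  simp only [List.length_drop]; omega

theorem gsp_nil (k : Nat) : gsp [] k = [] := by rw [gsp]; simp

-- A's inner swap loop, element by element: positions in [start, end] are mirrored
theorem pvSwapA_getElem? (n : Nat) : ∀ (l : List Char) (a e : Nat), e - a ≤ n → e < l.length →
    ∀ j : Nat, (pvSwapA l (a : Int) (e : Int))[j]? =
      if a ≤ j ∧ j ≤ e then l[a + e - j]? else l[j]? := by
  induction n with
  | zero =>
    intro l a e hn he j
    rw [pvSwapA, if_neg (by omega)]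
    split
    · next h => have : j = a ∧ j = e := by omega
                rw [show a + e - j = j by omega]
    · rfl
  | succ n ih =>
    intro l a e hn he j
    by_cases hlt : a < e
    · rw [pvSwapA, if_pos (by exact_mod_cast hlt)]
      have h0e : (0:Int) ≤ (e:Int) := by positivity
      have hset : (PySem.List.pySetD (PySem.List.pySetD l (a:Int) (PySem.List.pyGetD l (e:Int) ' '))
          (e:Int) (PySem.List.pyGetD l (a:Int) ' '))
          = (l.set a (l.getD e ' ')).set e (l.getD a ' ') := by
        simp [PySem.List.pySetD_natCast, PySem.List.pyGetD_natCast]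
      rw [hset]
      have hca : ((a:Int) + 1) = ((a+1 : Nat) : Int) := by push_cast; ring
      have hce : ((e:Int) - 1) = ((e-1 : Nat) : Int) := by omega
      rw [hca, hce]
      have hlen : ((l.set a (l.getD e ' ')).set e (l.getD a ' ')).length = l.length := by simp
      rw [ih _ (a+1) (e-1) (by omega) (by omega) j]
      have hgd : ∀ (v w : Char) (m : Nat), ((l.set a v).set e w)[m]? =
          if m = e then some w else if m = a then some v else l[m]? := by
        intro v w m
        simp only [List.getElem?_set, List.length_set]
        split_ifs <;> first | rfl | omega
      have hgda : some (l.getD a ' ') = l[a]? := by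
        rw [List.getD_eq_getElem?_getD, List.getElem?_eq_getElem (by omega)]; rfl
      have hgde : some (l.getD e ' ') = l[e]? := by
        rw [List.getD_eq_getElem?_getD, List.getElem?_eq_getElem (by omega)]; rfl
      by_cases hj1 : a + 1 ≤ j ∧ j ≤ e - 1
      · rw [if_pos hj1, if_pos (by omega), hgd]
        rw [show a + 1 + (e-1) - j = a + e - j by omega]
        rw [if_neg (by omega), if_neg (by omega)]
      · rw [if_neg hj1, hgd]
        by_cases hje : j = e
        · rw [if_pos hje, if_pos (show a ≤ j ∧ j ≤ e by omega),
            show a + e - j = a by omega]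
          exact hgda
        · rw [if_neg hje]
          by_cases hja : j = a
          · rw [if_pos hja, if_pos (show a ≤ j ∧ j ≤ e by omega),
            show a + e - j = e by omega]
            exact hgde
          · rw [if_neg hja, if_neg (by omega)]
    · rw [pvSwapA, if_neg (by exact_mod_cast hlt)]
      split
      · next h => have : j = a ∧ j = e := by omega
                  rw [show a + e - j = j by omega]
      · rfl

-- A's inner swap loop reverses the segment [a, e] in place
theorem pvSwapA_eq (l : List Char) (a e : Nat) (ha : a ≤ e) (he : e < l.length) :
    pvSwapA l (a : Int) (e : Int) =
      l.take a ++ ((l.drop a).take (e + 1 - a)).reverse ++ l.drop (e + 1) := by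
  have hB : ((l.drop a).take (e + 1 - a)).length = e + 1 - a := by
    simp [List.length_take, List.length_drop]; omega
  have hM : (((l.drop a).take (e + 1 - a)).reverse).length = e + 1 - a := by
    simp only [List.length_reverse]; exact hB
  have hA : (l.take a).length = a := by simp [List.length_take]; omega
  have hP : (l.take a ++ ((l.drop a).take (e + 1 - a)).reverse).length = e + 1 := by
    simp only [List.length_append, hA, hM]; omega
  apply List.ext_getElem?
  intro j
  rw [pvSwapA_getElem? (e - a) l a e le_rfl he j]
  by_cases h1 : j < a
  · rw [if_neg (by omega), List.getElem?_append_left (by omega),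
      List.getElem?_append_left (by omega), List.getElem?_take_of_lt h1]
  · by_cases h2 : j ≤ e
    · rw [if_pos (by omega), List.getElem?_append_left (by omega),
        List.getElem?_append_right (by omega), hA,
        List.getElem?_reverse (by rw [hB]; omega)]
      rw [hB, show e + 1 - a - 1 - (j - a) = e - j by omega,
        List.getElem?_take_of_lt (by omega), List.getElem?_drop,
        show a + (e - j) = a + e - j by omega]
    · rw [if_neg (by omega), List.getElem?_append_right (by omega), hP,
        List.getElem?_drop, show e + 1 + (j - (e + 1)) = j by omega]

-- A's outer loop: everything before index a is untouched, the rest is the block spec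
theorem pvOuterA_eq (n : Nat) : ∀ (l : List Char) (k a : Nat), 1 ≤ k → l.length - a ≤ n →
    pvOuterA l (k : Int) (l.length : Int) (a : Int) = l.take a ++ gsp (l.drop a) k := by
  induction n with
  | zero =>
    intro l k a hk hn
    rw [pvOuterA, if_neg (by omega), List.take_of_length_le (by omega),
      List.drop_eq_nil_of_le (by omega), gsp_nil, List.append_nil]
  | succ n ih =>
    intro l k a hk hn
    by_cases hal : a < l.length
    · rw [pvOuterA, if_pos (by omega), if_pos (by omega)]
      have hcast : min ((a:Int) + (k:Int) - 1) ((l.length:Int) - 1)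
          = ((min (a + k - 1) (l.length - 1) : Nat) : Int) := by omega
      set e : Nat := min (a + k - 1) (l.length - 1) with he
      have hae : a ≤ e := by omega
      have hel : e < l.length := by omega
      rw [hcast, pvSwapA_eq l a e hae hel]
      have f2 : (l.drop a).take (e + 1 - a) = (l.drop a).take k := by
        by_cases h : k ≤ l.length - a
        · rw [show e + 1 - a = k by omega]
        · rw [show e + 1 - a = l.length - a by omega,
            List.take_of_length_le (by simp [List.length_drop]),
            List.take_of_length_le (by simp [List.length_drop]; omega)]
      have f3 : l.drop (e + 1) = (l.drop a).drop k := by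
        rw [List.drop_drop]
        by_cases h : k ≤ l.length - a
        · rw [show a + k = e + 1 by omega]
        · have h4 : l.drop (e + 1) = [] := List.drop_eq_nil_of_le (by omega)
          have h5 : l.drop (a + k) = [] := List.drop_eq_nil_of_le (by omega)
          rw [h4, h5]
      rw [f2, f3]
      set R : List Char := ((l.drop a).take k).reverse with hR
      set T : List Char := (l.drop a).drop k with hT
      have hlenR : R.length = min k (l.length - a) := by
        simp [hR, List.length_take, List.length_drop]
      have hlenT : T.length = l.length - a - k := by
        simp only [hT, List.length_drop, Nat.sub_sub]
      have hlen' : (l.take a ++ R ++ T).length = l.length := by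
        simp only [List.length_append, List.length_take]; omega
      have hcast2 : (a:Int) + 2 * (k:Int) = ((a + 2 * k : Nat) : Int) := by push_cast; ring
      rw [hcast2, show ((l.length : Nat) : Int) = (((l.take a ++ R ++ T).length : Nat) : Int) by rw [hlen']]
      rw [ih (l.take a ++ R ++ T) k (a + 2 * k) hk (by rw [hlen']; omega)]
      have hcond : ¬(l.drop a = [] ∨ k = 0) := by
        push Not
        exact ⟨by rw [Ne, List.drop_eq_nil_iff]; omega, by omega⟩
      conv_rhs => rw [gsp]
      rw [dif_neg hcond]
      have h1 : (l.take a).length = a := by simp [List.length_take]; omega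
      by_cases hc : k ≤ l.length - a
      · have hRk : R.length = k := by rw [hlenR]; omega
        have htake : (l.take a ++ R ++ T).take (a + 2 * k) = l.take a ++ (R ++ T.take k) := by
          rw [List.append_assoc, List.take_append, List.take_append, h1, hRk,
            List.take_of_length_le (le_of_eq_of_le h1 (by omega)),
            List.take_of_length_le (le_of_eq_of_le hRk (by omega)),
            show a + 2 * k - a - k = k by omega]
        have hdrop : (l.take a ++ R ++ T).drop (a + 2 * k) = (l.drop a).drop (2 * k) := by
          rw [List.append_assoc, List.drop_append, List.drop_append, h1, hRk,
            List.drop_eq_nil_of_le (le_of_eq_of_le h1 (by omega)),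
            List.drop_eq_nil_of_le (le_of_eq_of_le hRk (by omega)),
            show a + 2 * k - a - k = k by omega]
          simp only [List.nil_append, hT, List.drop_drop]
          congr 1
          omega
        rw [htake, hdrop]
        simp only [hR, hT, List.append_assoc]
      · have hTnil : T = [] := by
          rw [hT]; exact List.drop_eq_nil_of_le (by simp [List.length_drop]; omega)
        have hdnil : (l.drop a).drop (2 * k) = [] :=
          List.drop_eq_nil_of_le (by simp [List.length_drop]; omega)
        have htake : (l.take a ++ R ++ T).take (a + 2 * k) = l.take a ++ R ++ T := by
          apply List.take_of_length_le; rw [hlen']; omega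
        have hdrop : (l.take a ++ R ++ T).drop (a + 2 * k) = [] := by
          apply List.drop_eq_nil_of_le; rw [hlen']; omega
        rw [htake, hdrop, hTnil, hdnil, gsp_nil]
        simp only [List.append_nil]
        have h6 : (l.drop a).drop k = [] :=
          List.drop_eq_nil_of_le (by simp [List.length_drop]; omega)
        rw [h6, hR]
        simp
    · rw [pvOuterA, if_neg (by omega), List.take_of_length_le (by omega),
        List.drop_eq_nil_of_le (by omega), gsp_nil, List.append_nil]

-- B's loop accumulates exactly the block spec of the suffix from index a
theorem pvLoopB_eq (n : Nat) : ∀ (cs : List Char) (k a : Nat) (res : List (List Char)),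
    1 ≤ k → cs.length - a ≤ n →
    (pvLoopB cs (k : Int) (a : Int) res).flatten = res.flatten ++ gsp (cs.drop a) k := by
  induction n with
  | zero =>
    intro cs k a res hk hn
    rw [pvLoopB, if_neg (by omega), List.drop_eq_nil_of_le (by omega), gsp_nil, List.append_nil]
  | succ n ih =>
    intro cs k a res hk hn
    by_cases hal : a < cs.length
    · rw [pvLoopB, if_pos (by omega), if_pos (by omega)]
      have s1 : PySem.List.slice cs (some (a : Int)) (some ((a : Int) + (k : Int)))
          = (cs.drop a).take k := by
        rw [show ((a : Int) + (k : Int)) = ((a + k : Nat) : Int) by push_cast; ring,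
          PySem.List.slice_natCast, show a + k - a = k by omega]
      have s2 : PySem.List.slice cs (some ((a : Int) + (k : Int))) (some ((a : Int) + 2 * (k : Int)))
          = (cs.drop (a + k)).take k := by
        rw [show ((a : Int) + (k : Int)) = ((a + k : Nat) : Int) by push_cast; ring,
          show ((a : Int) + 2 * (k : Int)) = ((a + 2 * k : Nat) : Int) by push_cast; ring,
          PySem.List.slice_natCast, show a + 2 * k - (a + k) = k by omega]
      rw [s1, s2, show ((a : Int) + 2 * (k : Int)) = ((a + 2 * k : Nat) : Int) by push_cast; ring]
      rw [ih cs k (a + 2 * k) _ hk (by omega)]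
      have hcond : ¬(cs.drop a = [] ∨ k = 0) := by
        push Not
        exact ⟨by rw [Ne, List.drop_eq_nil_iff]; omega, by omega⟩
      conv_rhs => rw [gsp]
      rw [dif_neg hcond]
      simp only [List.flatten_append, List.flatten_cons, List.flatten_nil,
        List.drop_drop, List.append_assoc, List.append_nil]
    · rw [pvLoopB, if_neg (by omega), List.drop_eq_nil_of_le (by omega), gsp_nil, List.append_nil]

-- a string shorter than k is a single reversed block
theorem gsp_of_short (l : List Char) (k : Nat) (h : l.length < k) : gsp l k = l.reverse := by
  rcases l with _ | ⟨c, l⟩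
  · rw [gsp_nil]; rfl
  · rw [gsp, dif_neg (by
      push Not
      refine ⟨by simp, by simp at h; omega⟩)]
    rw [List.take_of_length_le (by omega), List.drop_eq_nil_of_le (by omega),
      List.drop_eq_nil_of_le (by simp at h ⊢; omega), gsp_nil]
    simp

-- ===== VERDICT (by name: the statement is the Claim_ definition above) =====
theorem get_reverse_string3_spec : Claim_equal_get_reverse_string3 := by
  intro s k _hdom hpre
  unfold Spec_get_reverse_string3
  show get_reverse_string3 s k = get_reverse_string3_alt s k
  unfold Pre_get_reverse_string3 at hpre
  rcases hpre with hk | hs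
  · obtain ⟨k', rfl⟩ : ∃ k' : Nat, k = (k' : Int) := ⟨k.toNat, by omega⟩
    have hk1 : 1 ≤ k' := by exact_mod_cast hk
    have halt : get_reverse_string3_alt s (k' : Int) = String.ofList (gsp s.toList k') := by
      unfold get_reverse_string3_alt
      rw [show (0 : Int) = ((0 : Nat) : Int) from rfl,
        pvLoopB_eq s.toList.length s.toList k' 0 [] hk1 (by omega)]
      simp
    have hlen2 : PySem.Str.len s = (s.toList.length : Int) := by simp [PySem.Str.len_eq]
    unfold get_reverse_string3
    by_cases hlen : PySem.Str.len s < (k' : Int)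
    · rw [if_pos hlen, PySem.Str.slice?_none_none_neg_one, Option.getD_some, halt,
        gsp_of_short _ _ (by rw [hlen2] at hlen; omega)]
    · rw [if_neg hlen, halt]
      congr 1
      rw [hlen2, show (0 : Int) = ((0 : Nat) : Int) from rfl,
        pvOuterA_eq s.toList.length s.toList k' 0 hk1 (by omega)]
      simp
  · subst hs
    have h0 : ("".toList : List Char) = [] := rfl
    have hBl : pvLoopB ([] : List Char) k 0 [] = [] := by
      rw [pvLoopB, if_neg (by norm_num)]
    unfold get_reverse_string3 get_reverse_string3_alt
    rw [h0, hBl]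
    by_cases hk : PySem.Str.len "" < k
    · rw [if_pos hk, PySem.Str.slice?_none_none_neg_one, Option.getD_some]
      rfl
    · rw [if_neg hk, pvOuterA, if_neg (by simp [PySem.Str.len_eq])]
      rfl
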